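-- pv_equiv track=rewrite | github.com/kevinmarquesp/advent-of-code | python/2023/day-03/main.py | get_whole_numbers_on_this_positions
-- ===== SOURCE A (Python) =====
-- from typing import Optional, Any
--
-- def get_line_numbers_index_list(line: str) -> list[tuple]:
--      numbers_index = []
--
--      current_number_indexes_buffer = []
--      already_registered_count = 0
--
--      for pos, char in enumerate(line):
--
--          if char.isdigit():
--              current_number_indexes_buffer.append(pos)
--              already_registered_count += 1
--
--          elif already_registered_count > 0:
--              first_num = current_number_indexes_buffer[0]
--              last_num = current_number_indexes_buffer[-1]
--
--              current_number_indexes_buffer = []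
--              already_registered_count = 0
--
--              numbers_index.append((first_num, last_num))
--
--      if already_registered_count > 0:
--          first_num = current_number_indexes_buffer[0]
--          last_num = current_number_indexes_buffer[-1]
--
--          numbers_index.append((first_num, last_num))
--
--      return numbers_index
--
-- def get_whole_numbers_on_this_positions(line: Optional[str], adjacent_nums_pos: tuple) -> list[int]:
--     if line is None:
--         return []
--
--     numbers_index_list = get_line_numbers_index_list(line)
--     whole_adjacent_numbers_positions = []
--
--     for num_pos_pair in numbers_index_list:
--         start, end = num_pos_pair
--         each_pos_index = list(range(start, end + 1))
--
--         for adjacent_num_pos in adjacent_nums_pos: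
--             if adjacent_num_pos in each_pos_index and num_pos_pair not in whole_adjacent_numbers_positions:
--                 whole_adjacent_numbers_positions.append(num_pos_pair)
--
--     whole_adjacent_numbers = [int(line[start: end + 1]) for start, end in whole_adjacent_numbers_positions]
--
--     return whole_adjacent_numbers
-- ===== SOURCE B (Python) =====
-- def get_whole_numbers_on_this_positions(line, adjacent_nums_pos):
--     if line is None:
--         return []
--     res = []
--     i, n = 0, len(line)
--     while i < n:
--         if line[i].isdigit():
--             j = i + 1
--             while j < n and line[j].isdigit():
--                 j += 1
--             # digit run occupies positions [i, j-1]
--             if any(i <= p <= j - 1 for p in adjacent_nums_pos):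
--                 res.append(int(line[i:j]))
--             i = j
--         else:
--             i += 1
--     return res
-- ===== Notes on version B (the rewrite author's own statement) =====
-- stated objective: simpler
-- what changed: Replaces the three-pass pipeline (buffer-based run-index helper, nested dedup/membership filter over materialized range lists, final slice-and-int comprehension) with a single left-to-right scan that finds each digit run in place and appends its int immediately when some adjacent position falls in the run's span.
import Mathlib
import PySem

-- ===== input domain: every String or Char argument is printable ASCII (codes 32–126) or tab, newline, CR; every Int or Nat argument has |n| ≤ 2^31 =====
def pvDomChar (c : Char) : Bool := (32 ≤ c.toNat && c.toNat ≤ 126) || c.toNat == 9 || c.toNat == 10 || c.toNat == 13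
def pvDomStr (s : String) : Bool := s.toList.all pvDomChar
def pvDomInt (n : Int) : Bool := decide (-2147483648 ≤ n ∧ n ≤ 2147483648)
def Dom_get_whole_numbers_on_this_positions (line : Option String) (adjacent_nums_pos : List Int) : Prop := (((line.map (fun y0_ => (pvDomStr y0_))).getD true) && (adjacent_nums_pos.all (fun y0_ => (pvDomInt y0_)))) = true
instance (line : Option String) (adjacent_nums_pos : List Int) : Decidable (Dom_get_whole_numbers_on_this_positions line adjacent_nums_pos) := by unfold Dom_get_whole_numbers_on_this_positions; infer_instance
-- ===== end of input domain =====

-- B replaces A's three-pass pipeline (run-index helper, nested dedup filter over range lists,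
-- slice comprehension) with one left-to-right scan appending each qualifying run's int directly: simpler.


-- ===== PORT A =====
-- buf[0] / buf[-1]; in A both are only read under the guard cnt > 0, so the .getD default is unreachable
def pvFirst (buf : List Int) : Int := (PySem.List.pyGet? buf 0).getD 0
def pvLast (buf : List Int) : Int := (PySem.List.pyGet? buf (-1)).getD 0

-- the for-loop of get_line_numbers_index_list, state = (numbers_index, buffer, already_registered_count)
def glnil_go : List Char → Int → List (Int × Int) → List Int → Int → List (Int × Int)
  | [], _, acc, buf, cnt => if cnt > 0 then acc ++ [(pvFirst buf, pvLast buf)] else acc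
  | c :: rest, pos, acc, buf, cnt =>
    if PySem.Chars.isdigit c then
      glnil_go rest (pos + 1) acc (buf ++ [pos]) (cnt + 1)
    else if cnt > 0 then
      glnil_go rest (pos + 1) (acc ++ [(pvFirst buf, pvLast buf)]) [] 0
    else
      glnil_go rest (pos + 1) acc buf cnt

def get_line_numbers_index_list (line : String) : List (Int × Int) :=
  glnil_go line.toList 0 [] [] 0

-- the inner 'for adjacent_num_pos in adjacent_nums_pos' loop of A
def aInner (adj : List Int) (pair : Int × Int) (acc : List (Int × Int)) : List (Int × Int) :=
  adj.foldl (fun acc p =>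
    if (PySem.List.pyRange pair.1 (pair.2 + 1) 1).contains p && !(acc.contains pair)
    then acc ++ [pair] else acc) acc

def get_whole_numbers_on_this_positions (line : Option String) (adjacent_nums_pos : List Int) : List Int :=
  match line with
  | none => []
  | some l =>
    let numbers_index_list := get_line_numbers_index_list l
    let kept := numbers_index_list.foldl (fun acc pair => aInner adjacent_nums_pos pair acc) []
    -- int(line[start:end+1]); the slice is a nonempty digit run, so int() never raises and .getD 0 is unreachable
    kept.map (fun se => (PySem.Int.ofChars? (PySem.Chars.slice l.toList (some se.1) (some (se.2 + 1)))).getD 0)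

-- ===== PORT B =====
-- B's while-loop: scan once; on a digit, take the whole run (the inner while), test the span, emit its int
def altGo (adj : List Int) : List Char → Int → List Int
  | [], _ => []
  | c :: rest, i =>
    if hd : PySem.Chars.isdigit c then
      let run := (c :: rest).takeWhile PySem.Chars.isdigit
      let j := i + run.length
      (if adj.any (fun p => decide (i ≤ p) && decide (p ≤ j - 1))
       then [(PySem.Int.ofChars? run).getD 0] else [])
        ++ altGo adj ((c :: rest).dropWhile PySem.Chars.isdigit) j
    else altGo adj rest (i + 1)
  termination_by cs => cs.length
  decreasing_by
    · simp only [List.dropWhile_cons, hd, if_pos]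
      exact Nat.lt_succ_of_le (List.length_dropWhile_le _ _)
    · simp

def get_whole_numbers_on_this_positions_alt (line : Option String) (adjacent_nums_pos : List Int) : List Int :=
  match line with
  | none => []
  | some l => altGo adjacent_nums_pos l.toList 0

-- ===== PRECONDITION & SPEC =====
def Spec_get_whole_numbers_on_this_positions (line : Option String) (adjacent_nums_pos : List Int) (out : List Int) : Prop := out = get_whole_numbers_on_this_positions_alt line adjacent_nums_pos
instance (line : Option String) (adjacent_nums_pos : List Int) (out : List Int) : Decidable (Spec_get_whole_numbers_on_this_positions line adjacent_nums_pos out) := by unfold Spec_get_whole_numbers_on_this_positions; infer_instance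

-- ===== CLAIM (what is proved, stated in full; the proofs are below) =====
def Claim_equal_get_whole_numbers_on_this_positions : Prop := ∀ (line : Option String) (adjacent_nums_pos : List Int), Dom_get_whole_numbers_on_this_positions line adjacent_nums_pos → Spec_get_whole_numbers_on_this_positions line adjacent_nums_pos (get_whole_numbers_on_this_positions line adjacent_nums_pos)

-- ===== LEMMAS AND PROOFS =====

-- the digit runs of cs starting at absolute position i: (start, end, run chars)
def runsC : List Char → Int → List (Int × Int × List Char)
  | [], _ => []
  | c :: rest, i =>
    if hd : PySem.Chars.isdigit c then
      let run := (c :: rest).takeWhile PySem.Chars.isdigit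
      (i, i + run.length - 1, run) :: runsC ((c :: rest).dropWhile PySem.Chars.isdigit) (i + run.length)
    else runsC rest (i + 1)
  termination_by cs => cs.length
  decreasing_by
    · simp only [List.dropWhile_cons, hd, if_pos]
      exact Nat.lt_succ_of_le (List.length_dropWhile_le _ _)
    · simp

theorem altGo_eq_runsC (adj : List Int) (cs : List Char) (i : Int) :
    altGo adj cs i =
      ((runsC cs i).filter
        (fun t => adj.any (fun p => decide (t.1 ≤ p) && decide (p ≤ t.2.1)))).map
        (fun t => (PySem.Int.ofChars? t.2.2).getD 0) := by
  induction cs, i using runsC.induct with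
  | case1 i => simp [altGo, runsC]
  | case2 c rest i hd run ih =>
    rw [altGo, runsC]
    simp only [dif_pos hd, List.filter_cons]
    by_cases hany : (adj.any (fun p => decide (i ≤ p) && decide (p ≤ i + ((c :: rest).takeWhile PySem.Chars.isdigit).length - 1))) = true
    · rw [if_pos hany, if_pos hany, ih]
      rfl
    · rw [if_neg hany, if_neg hany, ih]
      rfl
  | case3 c rest i hd ih =>
    rw [altGo, runsC]
    simp only [dif_neg hd]
    exact ih


theorem runsC_bounds (cs : List Char) (i : Int) (t : Int × Int × List Char)
    (ht : t ∈ runsC cs i) :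
    i ≤ t.1 ∧ t.1 ≤ t.2.1 ∧ t.2.1 < i + cs.length ∧
      t.2.2 = (cs.drop (t.1 - i).toNat).take (t.2.1 + 1 - t.1).toNat := by
  induction cs, i using runsC.induct with
  | case1 i => simp [runsC] at ht
  | case2 c rest i hd run ih =>
    rw [runsC] at ht
    simp only [dif_pos hd, List.mem_cons] at ht
    simp only [show run = (c :: rest).takeWhile PySem.Chars.isdigit from rfl] at ih
    have hlen1 : 1 ≤ ((c :: rest).takeWhile PySem.Chars.isdigit).length := by
      simp [hd]
    have hlenle : ((c :: rest).takeWhile PySem.Chars.isdigit).length ≤ (c :: rest).length :=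
      (List.takeWhile_prefix _).length_le
    have hdropeq : (c :: rest).dropWhile PySem.Chars.isdigit =
        (c :: rest).drop ((c :: rest).takeWhile PySem.Chars.isdigit).length := by
      conv_lhs => rw [show (c :: rest).dropWhile PySem.Chars.isdigit =
        ((c :: rest).takeWhile PySem.Chars.isdigit ++ (c :: rest).dropWhile PySem.Chars.isdigit).drop
          ((c :: rest).takeWhile PySem.Chars.isdigit).length from (List.drop_left ..).symm]
      rw [List.takeWhile_append_dropWhile]
    rcases ht with h | h
    · subst h
      dsimp only
      refine ⟨le_refl _, by omega, by omega, ?_⟩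
      have h0 : ((i : Int) - i).toNat = 0 := by omega
      have h1 : (i + ((c :: rest).takeWhile PySem.Chars.isdigit).length - 1 + 1 - i).toNat
          = ((c :: rest).takeWhile PySem.Chars.isdigit).length := by omega
      rw [h0, h1, List.drop_zero,
        ← List.prefix_iff_eq_take.mp (List.takeWhile_prefix _)]
    · rcases ih h with ⟨h1, h2, h3, h4⟩
      rw [hdropeq] at h3 h4
      refine ⟨by omega, h2, ?_, ?_⟩
      · rw [List.length_drop] at h3
        simp only [List.length_cons] at h3 ⊢
        omega
      · rw [h4, List.drop_drop]
        congr 2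
        omega
  | case3 c rest i hd ih =>
    rw [runsC] at ht
    simp only [dif_neg hd] at ht
    rcases ih ht with ⟨h1, h2, h3, h4⟩
    refine ⟨by omega, h2, by simp only [List.length_cons] at h3 ⊢; push_cast at h3 ⊢; omega, ?_⟩
    rw [h4, show (t.1 - i).toNat = (t.1 - (i + 1)).toNat + 1 from by omega,
      List.drop_succ_cons]

theorem runsC_pairwise (cs : List Char) (i : Int) :
    (runsC cs i).Pairwise (fun a b => a.1 < b.1) := by
  induction cs, i using runsC.induct with
  | case1 i => simp [runsC]
  | case2 c rest i hd run ih =>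
    rw [runsC]
    simp only [dif_pos hd]
    refine List.pairwise_cons.mpr ⟨fun t ht => ?_, ih⟩
    have h1 := (runsC_bounds _ _ t ht).1
    have hlen1 : 1 ≤ ((c :: rest).takeWhile PySem.Chars.isdigit).length := by
      simp [hd]
    show i < t.1
    omega
  | case3 c rest i hd ih =>
    rw [runsC]
    simp only [dif_neg hd]
    exact ih

theorem pvFirst_append (buf : List Int) (x : Int) (h : buf ≠ []) :
    pvFirst (buf ++ [x]) = pvFirst buf := by
  have hl : 0 < buf.length := List.length_pos_of_ne_nil h
  simp [pvFirst, PySem.List.pyGet?, PySem.List.pyIdx?, hl, List.getElem_append_left]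

theorem pvLast_append (buf : List Int) (x : Int) : pvLast (buf ++ [x]) = x := by
  simp [pvLast, PySem.List.pyGet?, PySem.List.pyIdx?]

theorem pvFirst_single (x : Int) : pvFirst [x] = x := by
  simp [pvFirst, PySem.List.pyGet?, PySem.List.pyIdx?]

theorem pvLast_single (x : Int) : pvLast [x] = x := by
  simp [pvLast, PySem.List.pyGet?, PySem.List.pyIdx?]

theorem glnil_go_runsC (cs : List Char) :
    (∀ (i : Int) (acc : List (Int × Int)),
        glnil_go cs i acc [] 0 = acc ++ (runsC cs i).map (fun t => (t.1, t.2.1))) ∧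
    (∀ (i : Int) (acc : List (Int × Int)) (buf : List Int) (b : Int),
        buf ≠ [] → pvFirst buf = b → pvLast buf = i - 1 →
        glnil_go cs i acc buf buf.length =
          acc ++ (b, i + ((cs.takeWhile PySem.Chars.isdigit).length : Int) - 1) ::
            (runsC (cs.dropWhile PySem.Chars.isdigit)
              (i + ((cs.takeWhile PySem.Chars.isdigit).length : Int))).map (fun t => (t.1, t.2.1))) := by
  induction cs with
  | nil =>
    constructor
    · intro i acc
      simp [glnil_go, runsC]
    · intro i acc buf b hne hf hl
      have hbl : 0 < buf.length := List.length_pos_of_ne_nil hne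
      simp only [glnil_go, List.takeWhile_nil, List.dropWhile_nil, List.length_nil, runsC,
        List.map_nil]
      rw [if_pos (show (↑buf.length : Int) > 0 by exact_mod_cast hbl), hf, hl]
      simp
  | cons c rest ih =>
    rcases ih with ⟨ih0, ihB⟩
    by_cases hd : PySem.Chars.isdigit c = true
    · constructor
      · intro i acc
        have h1 : glnil_go (c :: rest) i acc [] 0 = glnil_go rest (i + 1) acc [i] 1 := by
          simp only [glnil_go, hd, if_true]
          rfl
        rw [h1]
        have h2 := ihB (i + 1) acc [i] i (by simp) (pvFirst_single i)
          (by rw [pvLast_single]; omega)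
        rw [show ((([i].length : Nat)) : Int) = 1 from by simp] at h2
        rw [h2, runsC]
        simp only [dif_pos hd, List.map_cons, List.takeWhile_cons_of_pos hd,
          List.dropWhile_cons_of_pos hd, List.length_cons]
        rw [show (i + ((((rest.takeWhile PySem.Chars.isdigit).length + 1 : Nat)) : Int)) =
          i + 1 + ((rest.takeWhile PySem.Chars.isdigit).length : Int) from by push_cast; ring]
      · intro i acc buf b hne hf hl
        have h1 : glnil_go (c :: rest) i acc buf buf.length =
            glnil_go rest (i + 1) acc (buf ++ [i]) (buf.length + 1) := by
          simp only [glnil_go, hd, if_true]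
        rw [h1, show ((buf.length : Int) + 1) = (((buf ++ [i]).length : Nat) : Int) by push_cast [List.length_append, List.length_cons, List.length_nil]; ring]
        have h2 := ihB (i + 1) acc (buf ++ [i]) b (by simp)
          (by rw [pvFirst_append _ _ hne, hf]) (by rw [pvLast_append]; omega)
        rw [h2]
        simp only [List.takeWhile_cons_of_pos hd, List.dropWhile_cons_of_pos hd,
          List.length_cons]
        rw [show (i + ((((rest.takeWhile PySem.Chars.isdigit).length + 1 : Nat)) : Int)) =
          i + 1 + ((rest.takeWhile PySem.Chars.isdigit).length : Int) from by push_cast; ring]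
    · have hd' : PySem.Chars.isdigit c = false := by simpa using hd
      constructor
      · intro i acc
        have h1 : glnil_go (c :: rest) i acc [] 0 = glnil_go rest (i + 1) acc [] 0 := by
          simp [glnil_go, hd']
        rw [h1, ih0, runsC]
        simp only [dif_neg hd]
      · intro i acc buf b hne hf hl
        have hbl : 0 < buf.length := List.length_pos_of_ne_nil hne
        have h1 : glnil_go (c :: rest) i acc buf buf.length =
            glnil_go rest (i + 1) (acc ++ [(pvFirst buf, pvLast buf)]) [] 0 := by
          simp [glnil_go, hd', hbl]
        rw [h1, ih0, hf, hl]
        simp only [List.takeWhile_cons_of_neg hd, List.dropWhile_cons_of_neg hd,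
          List.length_nil]
        rw [runsC]
        simp only [dif_neg hd]
        simp

theorem aInner_mem (adj : List Int) (pair : Int × Int) (acc : List (Int × Int))
    (h : pair ∈ acc) : aInner adj pair acc = acc := by
  induction adj generalizing acc with
  | nil => rfl
  | cons p rest ih =>
    have hc : acc.contains pair = true := by simpa using h
    simp only [aInner, List.foldl_cons, hc, Bool.not_true, Bool.and_false, if_neg (Bool.false_ne_true)]
    exact ih acc h

theorem aInner_not_mem (adj : List Int) (pair : Int × Int) (acc : List (Int × Int))
    (h : pair ∉ acc) :
    aInner adj pair acc =
      if adj.any (fun p => (PySem.List.pyRange pair.1 (pair.2 + 1) 1).contains p)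
      then acc ++ [pair] else acc := by
  induction adj generalizing acc with
  | nil => rfl
  | cons p rest ih =>
    have hc : acc.contains pair = false := by simpa using h
    simp only [aInner, List.foldl_cons, hc, Bool.not_false, Bool.and_true, List.any_cons]
    by_cases hp : (PySem.List.pyRange pair.1 (pair.2 + 1) 1).contains p = true
    · have h2 : aInner rest pair (acc ++ [pair]) = acc ++ [pair] :=
        aInner_mem rest pair _ (by simp)
      simp only [aInner] at h2
      simp only [hp, Bool.true_or]
      rw [if_pos trivial]
      exact h2
    · rw [Bool.not_eq_true] at hp
      have h2 := ih acc h
      simp only [aInner] at h2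
      simp only [hp, Bool.false_or]
      rw [if_neg Bool.false_ne_true]
      exact h2

theorem foldl_aInner (adj : List Int) (S : List (Int × Int)) (acc : List (Int × Int))
    (hnd : S.Nodup) (hdisj : ∀ p ∈ S, p ∉ acc) :
    S.foldl (fun acc pair => aInner adj pair acc) acc =
      acc ++ S.filter (fun pair => adj.any (fun p => (PySem.List.pyRange pair.1 (pair.2 + 1) 1).contains p)) := by
  induction S generalizing acc with
  | nil => simp
  | cons pair S' ih =>
    rw [List.foldl_cons, aInner_not_mem adj pair acc (hdisj pair (by simp))]
    rcases List.nodup_cons.mp hnd with ⟨hpair, hnd'⟩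
    by_cases hany : (adj.any (fun p => (PySem.List.pyRange pair.1 (pair.2 + 1) 1).contains p)) = true
    · rw [if_pos hany, ih (acc ++ [pair]) hnd'
        (fun q hq => by
          simp only [List.mem_append, List.mem_singleton, not_or]
          exact ⟨hdisj q (by simp [hq]), fun he => hpair (he ▸ hq)⟩)]
      simp only [List.filter_cons]
      rw [if_pos hany, List.append_assoc]
      rfl
    · rw [if_neg hany, ih acc hnd' (fun q hq => hdisj q (by simp [hq]))]
      simp only [List.filter_cons]
      rw [if_neg hany]

theorem range_cond (s e p : Int) :
    (PySem.List.pyRange s (e + 1) 1).contains p = (decide (s ≤ p) && decide (p ≤ e)) := by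
  rw [Bool.eq_iff_iff]
  simp [PySem.List.mem_pyRange_one]

-- ===== VERDICT (by name: the statement is the Claim_ definition above) =====

theorem get_whole_numbers_on_this_positions_spec : Claim_equal_get_whole_numbers_on_this_positions := by
  unfold Claim_equal_get_whole_numbers_on_this_positions
  intro line adj _
  unfold Spec_get_whole_numbers_on_this_positions
  cases line with
  | none => rfl
  | some l =>
    show (get_line_numbers_index_list l |>.foldl (fun acc pair => aInner adj pair acc) []).map
        (fun se => (PySem.Int.ofChars? (PySem.Chars.slice l.toList (some se.1) (some (se.2 + 1)))).getD 0)
      = altGo adj l.toList 0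
    have hS : get_line_numbers_index_list l = (runsC l.toList 0).map (fun t => (t.1, t.2.1)) :=
      (glnil_go_runsC l.toList).1 0 []
    have hnd : ((runsC l.toList 0).map (fun t => (t.1, t.2.1))).Nodup := by
      have hpw : ((runsC l.toList 0).map (fun t => (t.1, t.2.1))).Pairwise
          (fun a b : Int × Int => a.1 < b.1) :=
        List.Pairwise.map _ (fun _ _ h => h) (runsC_pairwise l.toList 0)
      exact hpw.imp (fun h he => by rw [he] at h; exact lt_irrefl _ h)
    rw [hS, foldl_aInner adj _ [] hnd (by simp), List.nil_append, altGo_eq_runsC,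
      List.filter_map, List.map_map]
    have hfeq : ((fun pair => adj.any fun p => (PySem.List.pyRange pair.1 (pair.2 + 1) 1).contains p) ∘
          (fun t : Int × Int × List Char => (t.1, t.2.1)))
        = (fun t : Int × Int × List Char => adj.any (fun p => decide (t.1 ≤ p) && decide (p ≤ t.2.1))) := by
      funext t
      simp only [Function.comp_apply]
      congr 1
      funext p
      exact range_cond t.1 t.2.1 p
    rw [hfeq]
    refine List.map_congr_left ?_
    intro t ht
    have hb := runsC_bounds l.toList 0 t (List.mem_of_mem_filter ht)
    rcases hb with ⟨h0, h1, h2, h3⟩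
    simp only [Function.comp_apply]
    congr 2
    rw [PySem.Chars.slice_eq_listSlice,
      PySem.List.slice_toNat _ (by omega) (by omega), h3]
    have e1 : ((t.2.1 + 1).toNat - t.1.toNat) = (t.2.1 + 1 - t.1).toNat := by omega
    have e2 : t.1.toNat = (t.1 - 0).toNat := by omega
    rw [e1, e2]
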